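-- pv_equiv track=rewrite | github.com/Rodrun/APCSP | apcspminesweeper/envs/cell.py | value_to_rgba
-- ===== SOURCE A (Python) =====
-- def value_to_rgba(val: int) -> tuple:
--     """
--     Convert cell value to RGBA value. Can support
--     up to value 15, albeit up to value 8 is only
--     useful.
--     Arguments:
--     val - Cell value.
--     Returns:
--     RGB tuple.
--     """
--     if val <= 0 or val > 15:
--         return (90, 90, 90)  # Gray unrevealed
--     elif val <= 7:
--         cset = [0 for _ in range(3)]
--         power = len(cset) - 1
--         remainder = val
--         for power in range(len(cset) - 1, -1, -1):
--             bin_val = 2 ** power  # Binary value if current val is 1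
--             if bin_val <= remainder:
--                 v = 255  # Max out the current value
--                 cset[power] = v
--                 remainder -= bin_val
--             if remainder <= 0:
--                 break
--         return cset
--     else:  # Special case for >= 8
--         if val >= 8:  # Probably unecessary check
--             return (255, 100, 0)  # Orangey color
-- ===== SOURCE B (Python) =====
-- _COLORS = {
--     1: (255, 0, 0),
--     2: (0, 255, 0),
--     3: (255, 255, 0),
--     4: (0, 0, 255),
--     5: (255, 0, 255),
--     6: (0, 255, 255),
--     7: (255, 255, 255),
-- }
--
--
-- def value_to_rgba(val: int) -> tuple:
--     """Table-lookup version: one constant dict, no bit-decomposition loop."""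
--     if 1 <= val <= 7:
--         return list(_COLORS[val])
--     if 8 <= val <= 15:
--         return (255, 100, 0)
--     return (90, 90, 90)
-- ===== Notes on version B (the rewrite author's own statement) =====
-- stated objective: simpler
-- what changed: Replaced the binary-decomposition loop and nested branches with a single constant lookup table mapping 1..7 to their RGB lists, plus two range checks.
import Mathlib
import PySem

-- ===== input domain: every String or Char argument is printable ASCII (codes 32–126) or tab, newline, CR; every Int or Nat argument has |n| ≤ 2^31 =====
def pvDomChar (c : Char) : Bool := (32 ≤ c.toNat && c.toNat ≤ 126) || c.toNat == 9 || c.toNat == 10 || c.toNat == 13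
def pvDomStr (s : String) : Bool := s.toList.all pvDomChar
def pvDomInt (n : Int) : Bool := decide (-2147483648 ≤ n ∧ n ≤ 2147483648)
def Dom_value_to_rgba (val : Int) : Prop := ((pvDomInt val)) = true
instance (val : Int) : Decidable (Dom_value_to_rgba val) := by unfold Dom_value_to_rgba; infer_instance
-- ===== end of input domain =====

-- B replaces A's bit-decomposition loop with a constant lookup table (simpler; return value only —
-- Python A returns a fresh list for 1..7 and tuples otherwise, B preserves that).

-- ===== PORT A =====
-- the for-loop over range(len(cset)-1, -1, -1) with its early break; state = (cset, remainder)
def pvALoop : List Nat → List Int → Int → List Int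
  | [], cset, _ => cset
  | p :: ps, cset, remainder =>
    let binVal : Int := 2 ^ p
    let cset' := if binVal ≤ remainder then cset.set p 255 else cset
    let rem' := if binVal ≤ remainder then remainder - binVal else remainder
    if rem' ≤ 0 then cset' else pvALoop ps cset' rem'

def value_to_rgba (val : Int) : List Int :=
  if val ≤ 0 ∨ val > 15 then [90, 90, 90]
  else if val ≤ 7 then pvALoop [2, 1, 0] [0, 0, 0] val
  else if val ≥ 8 then [255, 100, 0]
  else []  -- unreachable: Python would fall off the function (returns None); never hit

-- ===== PORT B =====
def pvColors : PySem.Dict Int (List Int) := PySem.Dict.mk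
  [(1, [255, 0, 0]), (2, [0, 255, 0]), (3, [255, 255, 0]), (4, [0, 0, 255]),
   (5, [255, 0, 255]), (6, [0, 255, 255]), (7, [255, 255, 255])]

def value_to_rgba_alt (val : Int) : List Int :=
  if 1 ≤ val ∧ val ≤ 7 then PySem.Dict.getD pvColors val []
  else if 8 ≤ val ∧ val ≤ 15 then [255, 100, 0]
  else [90, 90, 90]

-- ===== PRECONDITION & SPEC =====
def Spec_value_to_rgba (val : Int) (out : List Int) : Prop := out = value_to_rgba_alt val
instance (val : Int) (out : List Int) : Decidable (Spec_value_to_rgba val out) := by unfold Spec_value_to_rgba; infer_instance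

-- ===== CLAIM (what is proved, stated in full; the proofs are below) =====
def Claim_equal_value_to_rgba : Prop := ∀ (val : Int), Dom_value_to_rgba val → Spec_value_to_rgba val (value_to_rgba val)

-- ===== LEMMAS AND PROOFS =====

-- ===== VERDICT (by name: the statement is the Claim_ definition above) =====
theorem value_to_rgba_spec : Claim_equal_value_to_rgba := by
  intro val _
  unfold Spec_value_to_rgba value_to_rgba value_to_rgba_alt
  by_cases h : val ≤ 0 ∨ val > 15
  · simp only [if_pos h]
    rcases h with h | h
    · rw [if_neg (by omega), if_neg (by omega)]
    · rw [if_neg (by omega), if_neg (by omega)]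
  · push_neg at h
    obtain ⟨h1, h2⟩ := h
    rw [if_neg (by omega)]
    interval_cases val <;> decide
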